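-- pv_equiv track=rewrite | github.com/polirritmico/codesignal_solutions | Python/The Core/secondRightmostZeroBit.py | second_rightmost_zero_bit
-- ===== SOURCE A (Python) =====
-- def second_rightmost_zero_bit(n):
--     reversed_binary_string = format(n, "32b")[::-1]
--     first_zero = False
--     for position in range(len(reversed_binary_string)):
--         current_value = reversed_binary_string[position]
--         if current_value == "0" and first_zero:
--             return 2 ** position
--         if current_value == "0":
--             first_zero = True
-- ===== SOURCE B (Python) =====
-- def second_rightmost_zero_bit(n):
--     m = abs(n)
--     inverted = m ^ ((1 << m.bit_length()) - 1)
--     rest = inverted & (inverted - 1)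
--     if rest == 0:
--         return None
--     return rest - (rest & (rest - 1))
-- ===== Notes on version B (the rewrite author's own statement) =====
-- stated objective: alternative
-- what changed: B replaces A's loop (format n to a 32-wide binary string, reverse it, scan characters with a first-zero flag) by a loop-free bit-twiddling formula: complement |n| within its bit length, clear the lowest set bit with x&(x-1), and isolate the next set bit as x-(x&(x-1)).
import Mathlib
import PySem

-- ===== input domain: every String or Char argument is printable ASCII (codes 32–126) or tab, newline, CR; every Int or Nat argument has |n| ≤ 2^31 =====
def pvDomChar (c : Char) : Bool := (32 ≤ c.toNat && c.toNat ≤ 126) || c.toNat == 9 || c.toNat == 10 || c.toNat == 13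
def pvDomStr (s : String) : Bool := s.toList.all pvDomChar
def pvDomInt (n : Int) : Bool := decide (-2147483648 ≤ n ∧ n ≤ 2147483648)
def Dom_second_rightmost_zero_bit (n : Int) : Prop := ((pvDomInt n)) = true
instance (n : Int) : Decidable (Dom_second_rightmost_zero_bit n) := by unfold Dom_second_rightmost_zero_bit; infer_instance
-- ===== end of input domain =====

-- B replaces A's string formatting/reversal/character scan by a loop-free bit-twiddling
-- formula (complement within the bit length, clear the lowest set bit, isolate the next one)
-- (objective: alternative).

-- ===== PORT A =====
-- binary digits of m, most significant first (hand port of format(m,'b'); exact for m > 0)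
def pvBinAux : Nat → List Char
  | 0 => []
  | m + 1 => pvBinAux ((m + 1) / 2) ++ [if (m + 1) % 2 = 1 then '1' else '0']
decreasing_by exact Nat.div_lt_self (Nat.succ_pos m) (by norm_num)

-- format(n, "32b"): digits of |n| ("0" for 0), '-' sign, left-padded with spaces to width 32
def pvFormat32b (n : Int) : List Char :=
  let digits := if n.natAbs = 0 then ['0'] else pvBinAux n.natAbs
  let signed := if n < 0 then '-' :: digits else digits
  List.replicate (32 - signed.length) ' ' ++ signed

-- the for-loop over the reversed string: position counter, first_zero flag, early return
def pvLoopA : List Char → Nat → Bool → Option Int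
  | [], _, _ => none
  | c :: rest, pos, firstZero =>
      if c = '0' then
        if firstZero then some ((2 : Int) ^ pos)
        else pvLoopA rest (pos + 1) true
      else pvLoopA rest (pos + 1) firstZero

def second_rightmost_zero_bit (n : Int) : Option Int :=
  pvLoopA (pvFormat32b n).reverse 0 false

-- ===== PORT B =====
-- hand port of the built-in int.bit_length() (exact for n ≥ 0)
def pvBitLen : Nat → Nat
  | 0 => 0
  | m + 1 => pvBitLen ((m + 1) / 2) + 1
decreasing_by exact Nat.div_lt_self (Nat.succ_pos m) (by norm_num)

def second_rightmost_zero_bit_alt (n : Int) : Option Int :=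
  let m := n.natAbs
  let inverted := m ^^^ ((1 <<< pvBitLen m) - 1)
  let rest := inverted &&& (inverted - 1)
  if rest = 0 then none
  else some ((rest : Int) - ((rest &&& (rest - 1) : Nat) : Int))

-- ===== PRECONDITION & SPEC =====
def Spec_second_rightmost_zero_bit (n : Int) (out : Option Int) : Prop := out = second_rightmost_zero_bit_alt n
instance (n : Int) (out : Option Int) : Decidable (Spec_second_rightmost_zero_bit n out) := by unfold Spec_second_rightmost_zero_bit; infer_instance

-- ===== CLAIM (what is proved, stated in full; the proofs are below) =====
def Claim_equal_second_rightmost_zero_bit : Prop := ∀ (n : Int), Dom_second_rightmost_zero_bit n → Spec_second_rightmost_zero_bit n (second_rightmost_zero_bit n)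

-- ===== LEMMAS AND PROOFS =====

-- proof-side abbreviations for B's three bit expressions
def pvInv (m : Nat) : Nat := m ^^^ ((1 <<< pvBitLen m) - 1)
def pvH (v : Nat) : Option Nat := if v = 0 then none else some (v - (v &&& (v - 1)))
def pvG (v : Nat) : Option Nat :=
  let rest := v &&& (v - 1)
  if rest = 0 then none else some (rest - (rest &&& (rest - 1)))

-- proof-side arithmetic scan linking A's character loop to B's formula
def pvScan (m : Nat) (fz : Bool) (v : Int) : Option Int :=
  if m = 0 then none
  else if m % 2 = 0 then (if fz then some v else pvScan (m / 2) true (v * 2))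
  else pvScan (m / 2) fz (v * 2)
decreasing_by all_goals exact Nat.div_lt_self (Nat.pos_of_ne_zero (by assumption)) (by norm_num)

-- a suffix without '0' characters contributes nothing to the scan
lemma pvLoopA_junk (junk : List Char) (pos : Nat) (fz : Bool)
    (h : ∀ c ∈ junk, c ≠ '0') : pvLoopA junk pos fz = none := by
  induction junk generalizing pos fz with
  | nil => rfl
  | cons c rest ih =>
      have hc : c ≠ '0' := h c (by simp)
      simp only [pvLoopA, if_neg hc]
      exact ih _ _ (fun d hd => h d (by simp [hd]))

lemma pvLoopA_append_junk (xs junk : List Char) (pos : Nat) (fz : Bool)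
    (h : ∀ c ∈ junk, c ≠ '0') : pvLoopA (xs ++ junk) pos fz = pvLoopA xs pos fz := by
  induction xs generalizing pos fz with
  | nil => simpa using pvLoopA_junk junk pos fz h
  | cons c rest ih =>
      simp only [List.cons_append, pvLoopA]
      split_ifs <;> first | rfl | exact ih _ _

-- the scan over the LSB-first bit list of m computes exactly pvScan
lemma pvLoopA_binAux (m : Nat) : ∀ (pos : Nat) (fz : Bool),
    pvLoopA (pvBinAux m).reverse pos fz = pvScan m fz ((2 : Int) ^ pos) := by
  induction m using Nat.strong_induction_on with
  | _ m ih =>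
      intro pos fz
      match m with
      | 0 => simp [pvBinAux, pvLoopA, pvScan]
      | Nat.succ k =>
          rw [pvBinAux, List.reverse_append, List.reverse_singleton, List.singleton_append]
          have hlt : (k + 1) / 2 < k + 1 := Nat.div_lt_self (Nat.succ_pos k) (by norm_num)
          rw [pvScan]
          simp only [Nat.succ_ne_zero, reduceIte]
          by_cases hp : (k + 1) % 2 = 1
          · have hp0 : ¬ (k + 1) % 2 = 0 := by omega
            rw [if_pos hp, if_neg hp0]
            simp only [pvLoopA, if_neg (by decide : ¬ ('1' : Char) = '0')]
            rw [ih _ hlt (pos + 1) fz, pow_succ]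
          · have hp0 : (k + 1) % 2 = 0 := by omega
            rw [if_neg hp, if_pos hp0]
            simp only [pvLoopA, reduceIte]
            cases fz with
            | true => simp
            | false => simp only [Bool.false_eq_true, reduceIte]
                       rw [ih _ hlt (pos + 1) true, pow_succ]

-- x & (x-1) for odd x clears bit 0
lemma pvLandPredOdd (v : Nat) (h : v % 2 = 1) : v &&& (v - 1) = v - 1 := by
  apply Nat.eq_of_testBit_eq
  intro i
  rw [Nat.testBit_and]
  cases i with
  | zero =>
      have h0 : (v - 1) % 2 = 0 := by omega
      simp [Nat.testBit_zero, h, h0]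
  | succ i =>
      have hd : (v - 1) / 2 = v / 2 := by omega
      rw [Nat.testBit_add_one, Nat.testBit_add_one, hd, Bool.and_self]

-- x & (x-1) for even x > 0 doubles the same expression on x/2
lemma pvLandPredEven (v : Nat) (h : v % 2 = 0) (hp : 0 < v) :
    v &&& (v - 1) = 2 * ((v / 2) &&& (v / 2 - 1)) := by
  apply Nat.eq_of_testBit_eq
  intro i
  rw [Nat.testBit_and]
  cases i with
  | zero =>
      have h1 : ¬ v % 2 = 1 := by omega
      simp [Nat.testBit_zero, h1]
  | succ i =>
      have hd : (v - 1) / 2 = v / 2 - 1 := by omega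
      have hm : 2 * ((v / 2) &&& (v / 2 - 1)) / 2 = (v / 2) &&& (v / 2 - 1) := by omega
      simp only [Nat.testBit_add_one]
      rw [hd, hm, Nat.testBit_and]

lemma pvH_double (w : Nat) : pvH (2 * w) = Option.map (fun k => 2 * k) (pvH w) := by
  by_cases hw : w = 0
  · simp [hw, pvH]
  · have hp : 0 < 2 * w := by omega
    have := pvLandPredEven (2 * w) (by omega) hp
    have hd : 2 * w / 2 = w := by omega
    rw [hd] at this
    simp only [pvH, if_neg (by omega : ¬ 2 * w = 0), if_neg hw, this, Option.map_some]
    congr 1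
    have hle : w &&& (w - 1) ≤ w := Nat.and_le_left
    omega

lemma pvG_double (w : Nat) : pvG (2 * w) = Option.map (fun k => 2 * k) (pvG w) := by
  by_cases hw : w = 0
  · simp [hw, pvG]
  · have hrest : 2 * w &&& (2 * w - 1) = 2 * (w &&& (w - 1)) := by
      have := pvLandPredEven (2 * w) (by omega) (by omega)
      have hd : 2 * w / 2 = w := by omega
      rwa [hd] at this
    simp only [pvG, hrest]
    by_cases hr : w &&& (w - 1) = 0
    · simp [hr]
    · have hp2 : 2 * (w &&& (w - 1)) &&& (2 * (w &&& (w - 1)) - 1)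
          = 2 * ((w &&& (w - 1)) &&& ((w &&& (w - 1)) - 1)) := by
        have := pvLandPredEven (2 * (w &&& (w - 1))) (by omega) (by omega)
        have hd : 2 * (w &&& (w - 1)) / 2 = w &&& (w - 1) := by omega
        rwa [hd] at this
      rw [if_neg (by omega), if_neg hr, hp2]
      simp only [Option.map_some]
      congr 1
      have hle : (w &&& (w - 1)) &&& ((w &&& (w - 1)) - 1) ≤ w &&& (w - 1) :=
        Nat.and_le_left
      omega

lemma pvG_odd (w : Nat) : pvG (2 * w + 1) = Option.map (fun k => 2 * k) (pvH w) := by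
  have hrest : (2 * w + 1) &&& (2 * w + 1 - 1) = 2 * w := by
    have := pvLandPredOdd (2 * w + 1) (by omega)
    simpa using this
  by_cases hw : w = 0
  · simp [hw, pvG, pvH]
  · have hp2 : 2 * w &&& (2 * w - 1) = 2 * (w &&& (w - 1)) := by
      have := pvLandPredEven (2 * w) (by omega) (by omega)
      have hd : 2 * w / 2 = w := by omega
      rwa [hd] at this
    simp only [pvG, hrest, if_neg (by omega : ¬ 2 * w = 0), hp2]
    simp only [pvH, if_neg hw, Option.map_some]
    congr 1
    have hle : w &&& (w - 1) ≤ w := Nat.and_le_left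
    omega

lemma pvBitLen_pos (m : Nat) (h : 0 < m) : pvBitLen m = pvBitLen (m / 2) + 1 := by
  match m, h with
  | Nat.succ k, _ => rw [pvBitLen]

-- the complement-within-bit-length satisfies the binary recursion
lemma pvInv_rec (m : Nat) (h : 0 < m) :
    pvInv m = 2 * pvInv (m / 2) + (1 - m % 2) := by
  apply Nat.eq_of_testBit_eq
  intro i
  have hbl : pvBitLen m = pvBitLen (m / 2) + 1 := pvBitLen_pos m h
  have hsh : ∀ k : Nat, (1 <<< k : Nat) = 2 ^ k := fun k => Nat.one_shiftLeft k
  cases i with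
  | zero =>
      rw [pvInv, Nat.testBit_xor, hsh, hbl, Nat.testBit_two_pow_sub_one]
      have hb : (2 * pvInv (m / 2) + (1 - m % 2)) % 2 = 1 - m % 2 := by omega
      simp only [Nat.testBit_zero, hb]
      by_cases hm : m % 2 = 1
      · simp [hm]
      · simp [show ¬ m % 2 = 1 from hm, show (1 - m % 2) = 1 by omega]
  | succ i =>
      have hq : (2 * pvInv (m / 2) + (1 - m % 2)) / 2 = pvInv (m / 2) := by omega
      rw [pvInv, Nat.testBit_xor, hsh, hbl, Nat.testBit_two_pow_sub_one]
      simp only [Nat.testBit_add_one]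
      rw [hq, pvInv, Nat.testBit_xor, hsh, Nat.testBit_two_pow_sub_one]
      congr 1
      exact decide_eq_decide.mpr (by omega)

-- the arithmetic scan computes B's closed-form bit expressions
lemma pvScan_eq (m : Nat) : ∀ (fz : Bool) (v : Int),
    pvScan m fz v
      = Option.map (fun k : Nat => (k : Int) * v) (if fz then pvH (pvInv m) else pvG (pvInv m)) := by
  induction m using Nat.strong_induction_on with
  | _ m ih =>
      intro fz v
      by_cases hm : m = 0
      · subst hm
        have : pvInv 0 = 0 := by simp [pvInv, pvBitLen]
        rw [pvScan]
        simp [this, pvH, pvG]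
      · have hlt : m / 2 < m := Nat.div_lt_self (Nat.pos_of_ne_zero hm) (by norm_num)
        rw [pvScan, if_neg hm]
        by_cases hp : m % 2 = 0
        · have hinv : pvInv m = 2 * pvInv (m / 2) + 1 := by
            rw [pvInv_rec m (Nat.pos_of_ne_zero hm)]; omega
          rw [if_pos hp, hinv]
          cases fz with
          | true =>
              have hodd := pvLandPredOdd (2 * pvInv (m / 2) + 1) (by omega)
              simp only [reduceIte, pvH, if_neg (by omega : ¬ 2 * pvInv (m / 2) + 1 = 0)]
              rw [hodd]
              have h1 : 2 * pvInv (m / 2) + 1 - (2 * pvInv (m / 2) + 1 - 1) = 1 := by omega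
              rw [h1]
              simp
          | false =>
              rw [ih _ hlt true (v * 2)]
              simp only [reduceIte, pvG_odd]
              cases pvH (pvInv (m / 2)) with
              | none => simp
              | some k => simp; ring
        · have hinv : pvInv m = 2 * pvInv (m / 2) := by
            rw [pvInv_rec m (Nat.pos_of_ne_zero hm)]; omega
          rw [if_neg hp, ih _ hlt fz (v * 2), hinv]
          cases fz with
          | true =>
              simp only [reduceIte, pvH_double]
              cases pvH (pvInv (m / 2)) with
              | none => simp
              | some k => simp; ring
          | false =>
              simp only [Bool.false_eq_true, reduceIte, pvG_double]
              cases pvG (pvInv (m / 2)) with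
              | none => simp
              | some k => simp; ring

-- ===== VERDICT (by name: the statement is the Claim_ definition above) =====
theorem second_rightmost_zero_bit_spec : Claim_equal_second_rightmost_zero_bit := by
  intro n _
  unfold Spec_second_rightmost_zero_bit second_rightmost_zero_bit pvFormat32b
  simp only [List.reverse_append]
  set digits := if n.natAbs = 0 then ['0'] else pvBinAux n.natAbs with hdig
  set signed := if n < 0 then '-' :: digits else digits with hsg
  have hrev : signed.reverse = digits.reverse ++ (if n < 0 then ['-'] else []) := by
    rw [hsg]; split_ifs <;> simp
  have hjunk : pvLoopA (signed.reverse ++ (List.replicate (32 - signed.length) ' ').reverse) 0 false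
      = pvLoopA digits.reverse 0 false := by
    rw [hrev, List.append_assoc]
    apply pvLoopA_append_junk
    intro c hc
    rcases List.mem_append.1 hc with h | h
    · split_ifs at h <;> simp_all
    · have := List.mem_reverse.1 h
      simp_all [List.eq_of_mem_replicate this]
  rw [hjunk]
  have hA : pvLoopA digits.reverse 0 false = pvScan n.natAbs false 1 := by
    rw [hdig]
    by_cases h0 : n.natAbs = 0
    · rw [if_pos h0, h0]
      simp [pvLoopA, pvScan]
    · rw [if_neg h0]
      simpa using pvLoopA_binAux n.natAbs 0 false
  rw [hA, pvScan_eq]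
  simp only [Bool.false_eq_true, reduceIte]
  unfold second_rightmost_zero_bit_alt
  show Option.map _ (pvG (pvInv n.natAbs)) = _
  rw [pvG]
  simp only [pvInv]
  set rest := (n.natAbs ^^^ (1 <<< pvBitLen n.natAbs - 1)) &&&
      ((n.natAbs ^^^ (1 <<< pvBitLen n.natAbs - 1)) - 1) with hrest
  by_cases hr : rest = 0
  · simp [hr]
  · rw [if_neg hr, if_neg hr]
    simp only [Option.map_some]
    congr 1
    have hle : rest &&& (rest - 1) ≤ rest := Nat.and_le_left
    push_cast [hle]
    ring
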